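-- pv_equiv track=rewrite | github.com/NikonPic/AlignmentNet | src/train_detectron.py | transform_segmentation
-- ===== SOURCE A (Python) =====
-- def transform_segmentation(anno, y_min, x_min, key='segmentation'):
--     new_anno = anno.copy()
--     if key in anno.keys():
--         segmentation = anno[key]
--         new_segmentation = []
--         for poly in segmentation:
--             if len(poly) > 2:
--                 x_arr, y_arr = poly[::2], poly[1::2]
--                 x_arr = [x + x_min for x in x_arr]
--                 y_arr = [y + y_min for y in y_arr]
--                 new_seg = []
--                 for x, y in zip(x_arr, y_arr):
--                     new_seg.append(x)
--                     new_seg.append(y)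
--                 new_segmentation.append(new_seg)
--         new_anno[key] = new_segmentation
--
--     return new_anno
-- ===== SOURCE B (Python) =====
-- def _shift(poly, y_min, x_min):
--     out = []
--     i = 0
--     stop = len(poly) - 1
--     while i < stop:
--         out.append(poly[i] + x_min)
--         out.append(poly[i + 1] + y_min)
--         i += 2
--     return out
--
--
-- def transform_segmentation(anno, y_min, x_min, key='segmentation'):
--     new_anno = anno.copy()
--     if key in anno:
--         new_anno[key] = [_shift(poly, y_min, x_min)
--                          for poly in anno[key] if len(poly) > 2]
--     return new_anno
-- ===== Notes on version B (the rewrite author's own statement) =====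
-- stated objective: simpler
-- what changed: Replaces the two strided slices, two offset maps and the zip-and-reinterleave loop by one direct pairwise pass over each flat polygon list (poly[i]+x_min, poly[i+1]+y_min stepping by 2), with the kept polygons built by a single filtered comprehension.
import Mathlib
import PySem

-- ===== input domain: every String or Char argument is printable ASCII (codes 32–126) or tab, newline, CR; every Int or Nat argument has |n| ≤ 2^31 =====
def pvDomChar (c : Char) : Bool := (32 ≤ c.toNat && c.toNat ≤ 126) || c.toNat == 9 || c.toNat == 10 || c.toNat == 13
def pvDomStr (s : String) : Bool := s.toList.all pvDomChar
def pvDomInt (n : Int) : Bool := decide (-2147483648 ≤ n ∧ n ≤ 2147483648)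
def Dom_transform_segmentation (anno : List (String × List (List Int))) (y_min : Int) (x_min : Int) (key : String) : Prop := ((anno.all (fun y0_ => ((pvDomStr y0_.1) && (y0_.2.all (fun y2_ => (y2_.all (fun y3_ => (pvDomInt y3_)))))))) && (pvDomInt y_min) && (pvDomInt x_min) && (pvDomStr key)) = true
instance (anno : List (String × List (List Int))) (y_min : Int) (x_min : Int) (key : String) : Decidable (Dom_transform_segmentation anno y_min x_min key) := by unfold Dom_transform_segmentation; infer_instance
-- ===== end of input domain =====

-- B replaces A's strided slices + offset maps + zip-reinterleave by one direct pairwise pass per polygon; return value only (A's copy/assignment side effects are not modelled).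

-- ===== PORT A =====
-- A's inner loop body: strided slices poly[::2]/poly[1::2], offset maps, zip and re-interleave
def pvNewSegA (y_min x_min : Int) (poly : List Int) : List Int :=
  let x_arr := (PySem.List.slice? poly none none 2).getD []
  let y_arr := (PySem.List.slice? poly (some 1) none 2).getD []
  let x_arr2 := x_arr.map (fun x => x + x_min)
  let y_arr2 := y_arr.map (fun y => y + y_min)
  (x_arr2.zip y_arr2).foldl (fun ns p => (ns ++ [p.1]) ++ [p.2]) []

def transform_segmentation (anno : List (String × List (List Int))) (y_min : Int) (x_min : Int) (key : String) : List (String × List (List Int)) :=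
  let d := PySem.Dict.mk anno
  match d.get? key with
  | some segmentation =>
      let new_segmentation := segmentation.foldl (fun acc poly =>
        if poly.length > 2 then acc ++ [pvNewSegA y_min x_min poly] else acc) []
      (d.insert key new_segmentation).items
  | none => d.items

-- ===== PORT B =====
-- Source B's _shift: while i < len(poly)-1: append poly[i]+x_min; append poly[i+1]+y_min; i += 2
def pvShiftAux (y_min x_min : Int) (out : List Int) : List Int → List Int
  | x :: y :: rest => pvShiftAux y_min x_min ((out ++ [x + x_min]) ++ [y + y_min]) rest
  | _ => out

def transform_segmentation_alt (anno : List (String × List (List Int))) (y_min : Int) (x_min : Int) (key : String) : List (String × List (List Int)) :=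
  let d := PySem.Dict.mk anno
  match d.get? key with
  | some segmentation =>
      (d.insert key ((segmentation.filter (fun poly => poly.length > 2)).map
        (fun poly => pvShiftAux y_min x_min [] poly))).items
  | none => d.items

-- ===== PRECONDITION & SPEC =====
def Spec_transform_segmentation (anno : List (String × List (List Int))) (y_min : Int) (x_min : Int) (key : String) (out : List (String × List (List Int))) : Prop := out = transform_segmentation_alt anno y_min x_min key
instance (anno : List (String × List (List Int))) (y_min : Int) (x_min : Int) (key : String) (out : List (String × List (List Int))) : Decidable (Spec_transform_segmentation anno y_min x_min key out) := by unfold Spec_transform_segmentation; infer_instance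

-- ===== CLAIM (what is proved, stated in full; the proofs are below) =====
def Claim_equal_transform_segmentation : Prop := ∀ (anno : List (String × List (List Int))) (y_min : Int) (x_min : Int) (key : String), Dom_transform_segmentation anno y_min x_min key → Spec_transform_segmentation anno y_min x_min key (transform_segmentation anno y_min x_min key)

-- ===== LEMMAS AND PROOFS =====

-- non-accumulator form of the pairwise pass (proof helper)
def pvShift (y_min x_min : Int) : List Int → List Int
  | x :: y :: rest => (x + x_min) :: (y + y_min) :: pvShift y_min x_min rest
  | _ => []

lemma pvShiftAux_eq (y_min x_min : Int) (out : List Int) (xs : List Int) :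
    pvShiftAux y_min x_min out xs = out ++ pvShift y_min x_min xs := by
  induction xs using pvShift.induct generalizing out with
  | case1 x y rest ih => simp [pvShiftAux, pvShift, ih]
  | case2 l h =>
    match l, h with
    | [], _ => simp [pvShiftAux, pvShift]
    | [x], _ => simp [pvShiftAux, pvShift]
    | x :: y :: r, h => exact absurd rfl (h x y r)

-- elements at even positions (= poly[::2]; pvEvens xs.tail = poly[1::2])
def pvEvens {α : Type} : List α → List α
  | [] => []
  | [x] => [x]
  | x :: _ :: r => x :: pvEvens r

lemma pvEvens_cons {α : Type} (x : α) (r : List α) :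
    pvEvens (x :: r) = x :: pvEvens r.tail := by
  cases r <;> rfl

lemma pvEvens_spec {α : Type} (xs : List α) :
    List.filterMap (fun k => xs[2 * k]?) (List.range ((xs.length + 1) / 2)) = pvEvens xs := by
  induction xs using pvEvens.induct with
  | case1 => simp [pvEvens]
  | case2 x => simp [pvEvens, List.range_succ]
  | case3 x y r ih =>
    have hc : (List.length (x :: y :: r) + 1) / 2 = (r.length + 1) / 2 + 1 := by simp; omega
    rw [hc, List.range_succ_eq_map, List.filterMap_cons]
    have h0 : ((x :: y :: r)[2 * 0]?) = some x := by simp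
    rw [h0, List.filterMap_map]
    show x :: _ = pvEvens (x :: y :: r)
    rw [show pvEvens (x :: y :: r) = x :: pvEvens r from rfl]
    congr 1

lemma pv_slice_even {α : Type} (xs : List α) :
    PySem.List.slice? xs none none 2 = some (pvEvens xs) := by
  rw [PySem.List.slice?, PySem.List.sliceIndices]
  simp only
  norm_num
  rw [show (if 0 < xs.length then (((xs.length : Int) + 2 - 1) / 2).toNat else 0)
        = (xs.length + 1) / 2 from by split <;> omega]
  rw [← pvEvens_spec xs]
  congr 1

lemma pv_slice_odd {α : Type} (xs : List α) :
    PySem.List.slice? xs (some 1) none 2 = some (pvEvens xs.tail) := by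
  rw [PySem.List.slice?, PySem.List.sliceIndices]
  cases xs with
  | nil =>
    norm_num
    rfl
  | cons x r =>
    simp only
    norm_num
    rw [show (if 0 < r.length then (((r.length : Int) + 2 - 1) / 2).toNat else 0)
          = (r.length + 1) / 2 from by split <;> omega]
    rw [← pvEvens_spec r]
    congr 1
    funext k
    rw [show ((1 : Int) + 2 * (k : Int)).toNat = (2 * k) + 1 from by omega]
    simp

lemma pv_interleave (y_min x_min : Int) (xs : List Int) :
    (((pvEvens xs).map (fun x => x + x_min)).zip
      ((pvEvens xs.tail).map (fun y => y + y_min))).flatMap (fun p => [p.1, p.2])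
      = pvShift y_min x_min xs := by
  induction xs using pvShift.induct with
  | case1 x y rest ih =>
    rw [show pvEvens (x :: y :: rest) = x :: pvEvens rest from rfl]
    rw [List.tail_cons, pvEvens_cons]
    simp only [List.map_cons, List.zip_cons_cons, List.flatMap_cons, pvShift]
    rw [ih]
    rfl
  | case2 l h =>
    match l, h with
    | [], _ => simp [pvEvens, pvShift]
    | [x], _ => simp [pvEvens, pvShift]
    | x :: y :: r, h => exact absurd rfl (h x y r)

lemma pv_foldl_if_map {α β : Type} (f : α → β) (p : α → Prop) [DecidablePred p]
    (l : List α) (acc : List β) :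
    l.foldl (fun a x => if p x then a ++ [f x] else a) acc
      = acc ++ (l.filter (fun x => decide (p x))).map f := by
  induction l generalizing acc with
  | nil => simp
  | cons x t ih =>
    by_cases h : p x <;> simp [h, ih]

lemma pv_new_seg_eq (y_min x_min : Int) (poly : List Int) :
    pvNewSegA y_min x_min poly = pvShiftAux y_min x_min [] poly := by
  rw [pvNewSegA, pv_slice_even, pv_slice_odd, pvShiftAux_eq]
  simp only [Option.getD_some, List.nil_append]
  rw [show (fun (ns : List Int) (p : Int × Int) => (ns ++ [p.1]) ++ [p.2])
        = fun (ns : List Int) (p : Int × Int) => ns ++ [p.1, p.2] from by funext ns p; simp]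
  rw [PySem.List.foldl_append_eq_flatMap]
  rw [List.nil_append, pv_interleave]

-- ===== VERDICT (by name: the statement is the Claim_ definition above) =====
theorem transform_segmentation_spec : Claim_equal_transform_segmentation := by
  intro anno y_min x_min key _
  unfold Spec_transform_segmentation transform_segmentation transform_segmentation_alt
  cases h : (PySem.Dict.mk anno).get? key with
  | none => simp [h]
  | some seg =>
    simp only [h]
    congr 2
    rw [pv_foldl_if_map (fun poly => pvNewSegA y_min x_min poly) (fun poly => poly.length > 2)]
    rw [List.nil_append]
    apply List.map_congr_left
    intro poly _
    exact pv_new_seg_eq y_min x_min poly
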